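-- pv_equiv track=rewrite | github.com/GaryVermeulen/gdata | s10m/processCorpus.py | processRawCorpusString
-- ===== SOURCE A (Python) =====
-- def processRawCorpusString(rawCorpusString):
--
--     tmpLst = []
--     tmpSent = ''
--     newSent = []
--
--
--     for char in rawCorpusString:
--         if char == '.':     # We'll need to handle multiple ...
--             newSent.append(tmpSent + '.')
--             tmpSent = ''
--         elif char == '?':   # We'll need to handle multiple ???
--             newSent.append(tmpSent + '?')
--             tmpSent = ''
--         elif char == '!':   # We'll need to handle multiple !!!
--             newSent.append(tmpSent + '!')
--             tmpSent = ''
--         elif char == ';':   # We'll need to handle multiple ;;;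
--             newSent.append(tmpSent + ';')
--             tmpSent = ''
--         elif char == '"':   # Skip "
--             continue
--         elif char == '\n':
--             tmpSent = tmpSent + ' '
--         else:
--             tmpSent = tmpSent + char
--
--     for sent in newSent:
--         sent = sent.lstrip()
--         if sent[0] == '-' and sent[1] == '-':
--             sent = sent[2:]
--         tmpLst.append(sent)
--
--
--
--     return tmpLst
-- ===== SOURCE B (Python) =====
-- def _cleanSentence(sent):
--     sent = sent.lstrip()
--     if sent.startswith('--'):
--         sent = sent[2:]
--     return sent
--
--
-- def processRawCorpusString(rawCorpusString):
--     # normalize once: drop double quotes, turn newlines into spaces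
--     normalized = ''.join(' ' if ch == '\n' else ch for ch in rawCorpusString if ch != '"')
--     sentences = []
--     start = 0
--     for i, ch in enumerate(normalized):
--         if ch in '.?!;':
--             sentences.append(normalized[start:i + 1])
--             start = i + 1
--     return [_cleanSentence(s) for s in sentences]
-- ===== Notes on version B (the rewrite author's own statement) =====
-- stated objective: alternative
-- what changed: B first normalizes the whole string in one pass (drop '"', newline to space), then splits it into sentences by enumerating terminator positions and taking index-based slices of the normalized string, and cleans the sentences with a list comprehension, instead of A's interleaved character-by-character state machine that builds each sentence by repeated string concatenation.
import Mathlib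
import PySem

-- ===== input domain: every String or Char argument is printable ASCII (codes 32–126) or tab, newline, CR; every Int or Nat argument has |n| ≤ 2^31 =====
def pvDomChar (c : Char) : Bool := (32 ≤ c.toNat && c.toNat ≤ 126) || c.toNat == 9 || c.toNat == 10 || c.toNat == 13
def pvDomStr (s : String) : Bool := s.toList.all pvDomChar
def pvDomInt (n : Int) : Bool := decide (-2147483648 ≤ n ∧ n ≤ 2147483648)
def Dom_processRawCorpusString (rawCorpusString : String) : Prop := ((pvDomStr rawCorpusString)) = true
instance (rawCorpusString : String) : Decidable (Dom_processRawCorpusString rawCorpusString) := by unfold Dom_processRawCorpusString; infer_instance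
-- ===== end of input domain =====

-- B replaces A's interleaved character/state machine by normalize-then-index-slice splitting (index-based
-- slices out of one normalized string instead of character-by-character string accumulation): alternative.

-- ===== PORT A =====
-- Strings are carried as List Char (PySem.Chars); String.ofList only when a sentence is emitted.
def pvAStep (st : List Char × List (List Char)) (c : Char) : List Char × List (List Char) :=
  if c = '.' then ([], st.2 ++ [st.1 ++ ['.']])
  else if c = '?' then ([], st.2 ++ [st.1 ++ ['?']])
  else if c = '!' then ([], st.2 ++ [st.1 ++ ['!']])
  else if c = ';' then ([], st.2 ++ [st.1 ++ [';']])
  else if c = '"' then st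
  else if c = '\n' then (st.1 ++ [' '], st.2)
  else (st.1 ++ [c], st.2)

-- sent[0] / sent[1]: Python's IndexError is unreachable here — every emitted sentence ends in a
-- terminator, so after lstrip it is nonempty, and when its first char is '-' it has length ≥ 2.
def pvAClean (sent : List Char) : String :=
  let s := PySem.Chars.lstrip sent
  if PySem.List.pyGet? s 0 = some '-' ∧ PySem.List.pyGet? s 1 = some '-' then
    String.ofList (PySem.List.slice s (some 2) none)
  else String.ofList s

def processRawCorpusString (rawCorpusString : String) : List String :=
  let st := rawCorpusString.toList.foldl pvAStep ([], [])
  st.2.foldl (fun acc sent => acc ++ [pvAClean sent]) []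

-- ===== PORT B =====
def pvIsTerm (c : Char) : Bool := c = '.' || c = '?' || c = '!' || c = ';'

-- ' ' if ch == '\n' else ch, for ch ≠ '"'  (the ''.join(...) generator of Source B)
def pvNorm (c : Char) : Option Char :=
  if c = '"' then none else if c = '\n' then some ' ' else some c

def pvBClean (sent : List Char) : String :=
  let s := PySem.Chars.lstrip sent
  if PySem.Chars.startswith s ['-', '-'] then String.ofList (PySem.List.slice s (some 2) none)
  else String.ofList s

def pvBStep (normalized : List Char) (st : List (List Char) × Int) (p : Int × Char) :
    List (List Char) × Int :=
  if pvIsTerm p.2 then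
    (st.1 ++ [PySem.List.slice normalized (some st.2) (some (p.1 + 1))], p.1 + 1)
  else st

def processRawCorpusString_alt (rawCorpusString : String) : List String :=
  let normalized := rawCorpusString.toList.filterMap pvNorm
  let st := (PySem.List.enumerate normalized).foldl (pvBStep normalized) ([], 0)
  st.1.map pvBClean

-- ===== PRECONDITION & SPEC =====
def Spec_processRawCorpusString (rawCorpusString : String) (out : List String) : Prop := out = processRawCorpusString_alt rawCorpusString
instance (rawCorpusString : String) (out : List String) : Decidable (Spec_processRawCorpusString rawCorpusString out) := by unfold Spec_processRawCorpusString; infer_instance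

-- ===== CLAIM (what is proved, stated in full; the proofs are below) =====
def Claim_equal_processRawCorpusString : Prop := ∀ (rawCorpusString : String), Dom_processRawCorpusString rawCorpusString → Spec_processRawCorpusString rawCorpusString (processRawCorpusString rawCorpusString)

-- ===== LEMMAS AND PROOFS =====

-- common specification: sentence segments of a terminator-delimited char list
def pvSegs : List Char → List Char → List (List Char)
  | _, [] => []
  | cur, c :: rest => if pvIsTerm c then (cur ++ [c]) :: pvSegs [] rest else pvSegs (cur ++ [c]) rest

theorem pvA_fold_eq (cs : List Char) : ∀ (tmp : List Char) (acc : List (List Char)),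
    (cs.foldl pvAStep (tmp, acc)).2 = acc ++ pvSegs tmp (cs.filterMap pvNorm) := by
  induction cs with
  | nil => intro tmp acc; simp [pvSegs]
  | cons c rest ih =>
    intro tmp acc
    by_cases h1 : c = '.'
    · subst h1; simp [pvAStep, pvNorm, pvSegs, pvIsTerm, ih]
    · by_cases h2 : c = '?'
      · subst h2; simp [pvAStep, pvNorm, pvSegs, pvIsTerm, ih]
      · by_cases h3 : c = '!'
        · subst h3; simp [pvAStep, pvNorm, pvSegs, pvIsTerm, ih]
        · by_cases h4 : c = ';'
          · subst h4; simp [pvAStep, pvNorm, pvSegs, pvIsTerm, ih]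
          · by_cases h5 : c = '"'
            · subst h5; simp [pvAStep, pvNorm, ih]
            · by_cases h6 : c = '\n'
              · subst h6; simp [pvAStep, pvNorm, pvSegs, pvIsTerm, ih]
              · simp [pvAStep, pvNorm, pvSegs, pvIsTerm, h1, h2, h3, h4, h5, h6, ih]

theorem pvTake_succ_of_drop {full rest : List Char} {c : Char} {start k : Nat}
    (hsk : start ≤ k) (hd : full.drop k = c :: rest) :
    (full.drop start).take (k - start + 1) = (full.drop start).take (k - start) ++ [c] := by
  rw [List.take_succ]
  have h0 : (full.drop start)[k - start]? = full[k]? := by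
    rw [List.getElem?_drop]; congr 1; omega
  have : full[k]? = some c := by
    have h : (List.drop k full)[0]? = full[k + 0]? := List.getElem?_drop
    simpa [hd] using h.symm
  simp [h0, this]

theorem pvB_fold_eq (full : List Char) : ∀ (rest : List Char) (k start : Nat)
    (sents : List (List Char)), start ≤ k → full.drop k = rest →
    (((PySem.List.enumerate rest (k : Int)).foldl (pvBStep full) (sents, (start : Int))).1
      = sents ++ pvSegs ((full.drop start).take (k - start)) rest) := by
  intro rest
  induction rest with
  | nil => intro k start sents _ _; simp [PySem.List.enumerate, pvSegs]
  | cons c rest' ih =>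
    intro k start sents hsk hd
    have hcons : PySem.List.enumerate (c :: rest') (k : Int)
        = ((k : Int), c) :: PySem.List.enumerate rest' ((k : Int) + 1) := rfl
    have hd' : full.drop (k + 1) = rest' := by
      have h : List.drop 1 (List.drop k full) = List.drop (k + 1) full := List.drop_drop
      rw [← h, hd]; rfl
    rw [hcons, List.foldl_cons]
    by_cases ht : pvIsTerm c
    · have hstep : pvBStep full (sents, (start : Int)) ((k : Int), c)
          = (sents ++ [PySem.List.slice full (some (start : Int)) (some ((k : Int) + 1))],
             (k : Int) + 1) := by
        simp [pvBStep, ht]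
      have hcast : ((k : Int) + 1) = ((k + 1 : Nat) : Int) := by push_cast; ring
      have hslice : PySem.List.slice full (some (start : Int)) (some ((k : Int) + 1))
          = (full.drop start).take (k + 1 - start) := by
        rw [hcast, PySem.List.slice_natCast]
      rw [hstep, hcast, ih (k + 1) (k + 1) _ (le_refl _) hd']
      have hseg : (full.drop start).take (k + 1 - start)
          = (full.drop start).take (k - start) ++ [c] := by
        have : k + 1 - start = k - start + 1 := by omega
        rw [this]; exact pvTake_succ_of_drop hsk hd
      simp [pvSegs, ht, hslice, hseg]
    · have hstep : pvBStep full (sents, (start : Int)) ((k : Int), c) = (sents, (start : Int)) := by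
        simp [pvBStep, ht]
      have hcast : ((k : Int) + 1) = ((k + 1 : Nat) : Int) := by push_cast; ring
      rw [hstep, hcast, ih (k + 1) start _ (by omega) hd']
      have hseg : (full.drop start).take (k + 1 - start)
          = (full.drop start).take (k - start) ++ [c] := by
        have : k + 1 - start = k - start + 1 := by omega
        rw [this]; exact pvTake_succ_of_drop hsk hd
      simp [pvSegs, ht, hseg]

theorem pvClean_eq (sent : List Char) : pvAClean sent = pvBClean sent := by
  unfold pvAClean pvBClean
  have hcond : (PySem.List.pyGet? (PySem.Chars.lstrip sent) 0 = some '-' ∧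
      PySem.List.pyGet? (PySem.Chars.lstrip sent) 1 = some '-')
      ↔ PySem.Chars.startswith (PySem.Chars.lstrip sent) ['-', '-'] = true := by
    rw [PySem.Chars.startswith_iff]
    match PySem.Chars.lstrip sent with
    | [] => simp [PySem.List.pyGet?]
    | [a] => simp [PySem.List.pyGet?, PySem.List.pyIdx?]
    | a :: b :: t =>
      simp [PySem.List.pyGet?_zero_cons, List.cons_prefix_cons, eq_comm]
  by_cases h : PySem.Chars.startswith (PySem.Chars.lstrip sent) ['-', '-'] = true
  · rw [if_pos (hcond.mpr h), if_pos h]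
  · rw [if_neg (fun hc => h (hcond.mp hc)), if_neg h]

-- ===== VERDICT (by name: the statement is the Claim_ definition above) =====
theorem processRawCorpusString_spec : Claim_equal_processRawCorpusString := by
  intro raw _
  unfold Spec_processRawCorpusString processRawCorpusString processRawCorpusString_alt
  simp only []
  have hB := pvB_fold_eq (raw.toList.filterMap pvNorm) (raw.toList.filterMap pvNorm)
    0 0 [] (le_refl _) rfl
  norm_cast at hB
  rw [PySem.List.foldl_append_singleton_eq_map, pvA_fold_eq, hB]
  simp [List.map_congr_left (fun sent _ => pvClean_eq sent)]
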